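-- pv_equiv track=rewrite | github.com/aminekebouche/RSA-algorithm | main.py | num1
-- ===== SOURCE A (Python) =====
-- def num1(M):
--     M = M.lower()
--     code = ''
--     s= 'abcdefghijklmnopqrstuvwxyz'
--     for c in M:
--         trouv= False
--         i=0
--         while i<=25 and not(trouv):
--             if s[i]==c:
--                 trouv=True
--                 if i < 9:
--                     code = code + '0' + str(i + 1)
--                 else:
--                     code = code + str(i + 1)
--             i = i + 1
--     return code
-- ===== SOURCE B (Python) =====
-- def num1(M):
--     return ''.join(str(ord(c) - 96).zfill(2) for c in M.lower() if 'a' <= c <= 'z')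
-- ===== Notes on version B (the rewrite author's own statement) =====
-- stated objective: faster
-- what changed: Replaces the per-character linear trial scan of the 26-letter alphabet string (with a found-flag while loop and manual zero-padding branch) by a single join over a comprehension that computes the 1-based index arithmetically as ord(c)-96, guards non-letters with 'a' <= c <= 'z', and zero-pads with zfill(2).
import Mathlib
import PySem

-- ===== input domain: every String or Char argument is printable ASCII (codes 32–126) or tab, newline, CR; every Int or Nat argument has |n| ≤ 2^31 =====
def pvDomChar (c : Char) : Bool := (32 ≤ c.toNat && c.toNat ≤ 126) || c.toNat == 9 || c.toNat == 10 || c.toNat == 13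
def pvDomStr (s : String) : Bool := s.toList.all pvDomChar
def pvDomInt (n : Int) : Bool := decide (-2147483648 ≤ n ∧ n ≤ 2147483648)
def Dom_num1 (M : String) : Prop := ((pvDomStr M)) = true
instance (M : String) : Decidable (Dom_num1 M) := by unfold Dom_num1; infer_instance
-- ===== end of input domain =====

-- B replaces A's per-character trial scan of the alphabet string by a direct arithmetic
-- index (ord(c)-96) with a range guard and zfill(2) padding, as one join over a
-- comprehension (objective: more idiomatic, no inner search loop).

-- ===== PORT A =====
-- the alphabet string s of A, as code points
def pvAlphaA : List Char := "abcdefghijklmnopqrstuvwxyz".toList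

-- the while loop of A: scan s from index i until a match (trouv) or i > 25; on a match
-- emit '0' ++ str(i+1) or str(i+1).  Strings are carried as List Char (PySem convention).
def pvScanA : List Char → Nat → Char → List Char
  | [], _, _ => []
  | x :: xs, i, c =>
      if x = c then
        (if i < 9 then '0' :: PySem.Int.toChars ((i : Int) + 1)
         else PySem.Int.toChars ((i : Int) + 1))
      else pvScanA xs (i + 1) c

def num1 (M : String) : String :=
  String.ofList (((PySem.Str.lower M).toList).foldl
    (fun code c => code ++ pvScanA pvAlphaA 0 c) [])

-- ===== PORT B =====
def num1_alt (M : String) : String :=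
  String.ofList (PySem.Chars.join []
    ((((PySem.Str.lower M).toList).filter (fun c => decide ('a' ≤ c) && decide (c ≤ 'z'))).map
      (fun c => PySem.Chars.zfill (PySem.Int.toChars ((c.toNat : Int) - 96)) 2)))

-- ===== PRECONDITION & SPEC =====
def Spec_num1 (M : String) (out : String) : Prop := out = num1_alt M
instance (M : String) (out : String) : Decidable (Spec_num1 M out) := by unfold Spec_num1; infer_instance

-- ===== CLAIM (what is proved, stated in full; the proofs are below) =====
def Claim_equal_num1 : Prop := ∀ (M : String), Dom_num1 M → Spec_num1 M (num1 M)

-- ===== LEMMAS AND PROOFS =====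

-- B's per-character contribution
def pvContribB (c : Char) : List Char :=
  if ('a' ≤ c) ∧ (c ≤ 'z') then PySem.Chars.zfill (PySem.Int.toChars ((c.toNat : Int) - 96)) 2 else []

set_option maxRecDepth 4096 in
set_option maxHeartbeats 1000000 in
theorem pvPerChar_aux :
    ((List.range 256).all (fun n =>
      pvScanA pvAlphaA 0 (Char.ofNat n) == pvContribB (Char.ofNat n))) = true := by decide

theorem pvPerChar (c : Char) (h : c.toNat < 256) :
    pvScanA pvAlphaA 0 c = pvContribB c := by
  have := List.all_eq_true.mp pvPerChar_aux c.toNat (List.mem_range.mpr h)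
  simpa [Char.ofNat_toNat] using this

theorem pvLowerChar_lt (c : Char) (h : pvDomChar c = true) :
    (PySem.Chars.lowerChar c).toNat < 256 := by
  simp [pvDomChar] at h
  have h126 : c.toNat ≤ 126 := by omega
  unfold PySem.Chars.lowerChar
  split
  · rw [Char.toNat_ofNat]; split <;> omega
  · omega

theorem pvFoldA (l : List Char) (acc : List Char) :
    l.foldl (fun code c => code ++ pvScanA pvAlphaA 0 c) acc
      = acc ++ l.foldr (fun c r => pvScanA pvAlphaA 0 c ++ r) [] := by
  induction l generalizing acc with
  | nil => simp
  | cons x xs ih => simp [List.foldl_cons, ih, List.append_assoc]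

theorem pvJoin_nil_cons (x : List Char) (xs : List (List Char)) :
    PySem.Chars.join [] (x :: xs) = x ++ PySem.Chars.join [] xs := by
  cases xs with
  | nil => simp [PySem.Chars.join_singleton, PySem.Chars.join_nil]
  | cons y ys => simp [PySem.Chars.join_cons_cons]

theorem pvFoldB (l : List Char) :
    PySem.Chars.join []
        ((l.filter (fun c => decide ('a' ≤ c) && decide (c ≤ 'z'))).map
          (fun c => PySem.Chars.zfill (PySem.Int.toChars ((c.toNat : Int) - 96)) 2))
      = l.foldr (fun c r => pvContribB c ++ r) [] := by
  induction l with
  | nil => simp [PySem.Chars.join_nil]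
  | cons x xs ih =>
      by_cases h : ('a' ≤ x) ∧ (x ≤ 'z')
      · simp [h, pvJoin_nil_cons, ih, pvContribB]
      · have hb : (decide ('a' ≤ x) && decide (x ≤ 'z')) = false := by
          simp only [Bool.and_eq_false_iff, decide_eq_false_iff_not]; tauto
        simp [hb, ih, pvContribB, h]

theorem pvFoldr_eq (l : List Char) (h : ∀ c ∈ l, c.toNat < 256) :
    l.foldr (fun c r => pvScanA pvAlphaA 0 c ++ r) []
      = l.foldr (fun c r => pvContribB c ++ r) [] := by
  induction l with
  | nil => rfl
  | cons x xs ih =>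
      simp only [List.foldr_cons]
      rw [pvPerChar x (h x (List.mem_cons_self)), ih (fun c hc => h c (List.mem_cons_of_mem _ hc))]

-- ===== VERDICT (by name: the statement is the Claim_ definition above) =====
theorem num1_spec : Claim_equal_num1 := by
  intro M hDom
  unfold Spec_num1 num1 num1_alt
  congr 1
  rw [pvFoldA, List.nil_append, pvFoldB]
  apply pvFoldr_eq
  intro c hc
  rw [PySem.Str.toList_lower] at hc
  have : PySem.Chars.lower M.toList = M.toList.map PySem.Chars.lowerChar := rfl
  rw [this] at hc
  obtain ⟨d, hd, rfl⟩ := List.mem_map.mp hc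
  exact pvLowerChar_lt d (List.all_eq_true.mp hDom d hd)
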